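-- pv_equiv track=rewrite | github.com/AdamZhouSE/pythonHomework | Code/Cases/2575/.mooctest/answer.py | maxDepthAfterSplit
-- ===== SOURCE A (Python) =====
-- def maxDepthAfterSplit(seq: str) :
--     d = 0
--     dlst = []
--     for i in seq:
--         if i == '(':
--             dlst.append(d)
--             d += 1
--         else:
--             d -= 1
--             dlst.append(d)
--     return [i%2 for i in dlst]
-- ===== SOURCE B (Python) =====
-- def maxDepthAfterSplit(seq: str):
--     # closed form: the value A appends at position i always has the parity of i
--     # for '(' and of i+1 otherwise, so no running depth counter is needed
--     return [i % 2 if c == '(' else (i + 1) % 2 for i, c in enumerate(seq)]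
-- ===== Notes on version B (the rewrite author's own statement) =====
-- stated objective: idiomatic
-- what changed: Replaced the stateful running depth counter (and the second mod-2 pass over the collected depth list) with a single closed-form comprehension over enumerate(seq): the answer at index i is i%2 for '(' and (i+1)%2 otherwise, since the running balance at position i has the parity of i.
import Mathlib
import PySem

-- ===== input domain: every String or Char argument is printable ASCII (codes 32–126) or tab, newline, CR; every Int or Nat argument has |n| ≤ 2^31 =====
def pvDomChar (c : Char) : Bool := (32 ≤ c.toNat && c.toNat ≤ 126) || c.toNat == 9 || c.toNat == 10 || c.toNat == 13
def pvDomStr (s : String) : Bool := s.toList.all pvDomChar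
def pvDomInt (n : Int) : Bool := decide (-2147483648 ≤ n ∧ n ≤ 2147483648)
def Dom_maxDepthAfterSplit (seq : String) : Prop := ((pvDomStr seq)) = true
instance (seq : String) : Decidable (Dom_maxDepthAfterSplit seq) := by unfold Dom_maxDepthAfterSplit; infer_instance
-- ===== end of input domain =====

-- B replaces A's running depth counter and second mod-2 pass with a closed-form
-- per-index comprehension (i%2 for '(', (i+1)%2 otherwise); same values, same O(n) cost.


-- ===== PORT A =====
-- literal transliteration: fold carrying (d, dlst), then the [i%2 for i in dlst] pass
def maxDepthAfterSplit (seq : String) : List Int :=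
  let st := seq.toList.foldl
    (fun (st : Int × List Int) (c : Char) =>
      if c = '(' then (st.1 + 1, st.2 ++ [st.1]) else (st.1 - 1, st.2 ++ [st.1 - 1]))
    (0, [])
  st.2.map (fun i => PySem.Int.mod i 2)

-- ===== PORT B =====
-- literal transliteration of Source B: one comprehension over enumerate(seq)
def maxDepthAfterSplit_alt (seq : String) : List Int :=
  (PySem.List.enumerate seq.toList).map
    (fun p => if p.2 = '(' then PySem.Int.mod p.1 2 else PySem.Int.mod (p.1 + 1) 2)

-- ===== PRECONDITION & SPEC =====
def Spec_maxDepthAfterSplit (seq : String) (out : List Int) : Prop := out = maxDepthAfterSplit_alt seq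
instance (seq : String) (out : List Int) : Decidable (Spec_maxDepthAfterSplit seq out) := by unfold Spec_maxDepthAfterSplit; infer_instance

-- ===== CLAIM (what is proved, stated in full; the proofs are below) =====
def Claim_equal_maxDepthAfterSplit : Prop := ∀ (seq : String), Dom_maxDepthAfterSplit seq → Spec_maxDepthAfterSplit seq (maxDepthAfterSplit seq)

-- ===== LEMMAS AND PROOFS =====

theorem maxDepthAfterSplit_key (cs : List Char) : ∀ (d n : Int) (acc : List Int),
    PySem.Int.mod d 2 = PySem.Int.mod n 2 →
    ((cs.foldl
        (fun (st : Int × List Int) (c : Char) =>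
          if c = '(' then (st.1 + 1, st.2 ++ [st.1]) else (st.1 - 1, st.2 ++ [st.1 - 1]))
        (d, acc)).2).map (fun i => PySem.Int.mod i 2)
      = acc.map (fun i => PySem.Int.mod i 2)
        ++ (PySem.List.enumerate cs n).map
            (fun p => if p.2 = '(' then PySem.Int.mod p.1 2 else PySem.Int.mod (p.1 + 1) 2) := by
  induction cs with
  | nil => intro d n acc h; simp [PySem.List.enumerate]
  | cons c cs ih =>
    intro d n acc h
    simp only [List.foldl_cons, PySem.List.enumerate, List.map_cons]
    by_cases hc : c = '('
    · rw [if_pos hc, if_pos hc,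
        ih (d + 1) (n + 1) (acc ++ [d])
          (by simp only [PySem.Int.mod_eq_emod_of_pos (by norm_num : (0:Int) < 2)] at h ⊢; omega)]
      simp
      simp only [PySem.Int.mod_eq_emod_of_pos (by norm_num : (0:Int) < 2)] at h
      omega
    · rw [if_neg hc, if_neg hc,
        ih (d - 1) (n + 1) (acc ++ [d - 1])
          (by simp only [PySem.Int.mod_eq_emod_of_pos (by norm_num : (0:Int) < 2)] at h ⊢; omega)]
      have hd : PySem.Int.mod (d - 1) 2 = PySem.Int.mod (n + 1) 2 := by
        simp only [PySem.Int.mod_eq_emod_of_pos (by norm_num : (0:Int) < 2)] at h ⊢; omega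
      simp
      simp only [PySem.Int.mod_eq_emod_of_pos (by norm_num : (0:Int) < 2)] at hd
      omega

-- ===== VERDICT (by name: the statement is the Claim_ definition above) =====
theorem maxDepthAfterSplit_spec : Claim_equal_maxDepthAfterSplit := by
  intro seq _
  unfold Spec_maxDepthAfterSplit maxDepthAfterSplit maxDepthAfterSplit_alt
  simpa using maxDepthAfterSplit_key seq.toList 0 0 [] rfl
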